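-- pv_equiv track=rewrite | github.com/vhsw/Advent-of-Code | 2022/Day 18/boiling_boulders.py | part2
-- ===== SOURCE A (Python) =====
-- def part2(data: str):
--     """Part 2 solution"""
--     cubes = parse(data)
--     lo = min(min(cube) for cube in cubes) - 1
--     hi = max(max(cube) for cube in cubes) + 1
--     water = set()
--     todo = [(lo, lo, lo)]
--     while todo:
--         item = todo.pop()
--         if item in water or item in cubes or any(i < lo or i > hi for i in item):
--             continue
--         water.add(item)
--         todo.extend(neighbors(item))
--
--     return sum(sum(n in water for n in neighbors(cube)) for cube in cubes)
--
-- def parse(data: str):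
--     return {tuple(map(int, line.split(","))) for line in data.splitlines()}
--
-- def neighbors(pos: tuple[int, int, int]):
--     for i in range(3):
--         for v in (-1, 1):
--             d_pos = (v * (i == j) for j in range(3))
--             yield tuple(a + b for a, b in zip(pos, d_pos))
-- ===== SOURCE B (Python) =====
-- def part2(data: str):
--     """Part 2 solution: disjoint-set (union-find) over the empty cells of the
--     padded bounding box; the exterior is the component of the corner cell."""
--     cubes = {tuple(map(int, line.split(","))) for line in data.splitlines()}
--     lo = min(min(cube) for cube in cubes) - 1
--     hi = max(max(cube) for cube in cubes) + 1
--     rng = range(lo, hi + 1)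
--
--     parent = {}
--     size = {}
--     for x in rng:
--         for y in rng:
--             for z in rng:
--                 c = (x, y, z)
--                 if c not in cubes:
--                     parent[c] = c
--                     size[c] = 1
--
--     def find(c):
--         while parent[c] != c:
--             c = parent[c]
--         return c
--
--     def union(a, b):
--         ra, rb = find(a), find(b)
--         if ra == rb:
--             return
--         if size[ra] < size[rb]:
--             parent[ra] = rb
--             size[rb] += size[ra]
--         else:
--             parent[rb] = ra
--             size[ra] += size[rb]
--
--     for x in rng:
--         for y in rng:
--             for z in rng:
--                 c = (x, y, z)
--                 if c in parent:
--                     for d in ((x + 1, y, z), (x, y + 1, z), (x, y, z + 1)):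
--                         if d in parent:
--                             union(c, d)
--
--     root0 = find((lo, lo, lo))
--     return sum(1 for cube in cubes for n in neighbors(cube)
--                if n in parent and find(n) == root0)
--
--
-- def neighbors(pos):
--     for i in range(3):
--         for v in (-1, 1):
--             d_pos = (v * (i == j) for j in range(3))
--             yield tuple(a + b for a, b in zip(pos, d_pos))
-- ===== Notes on version B (the rewrite author's own statement) =====
-- stated objective: alternative
-- what changed: Replaces A's stack-driven DFS flood fill of the exterior with a disjoint-set (union-find with union by size) built over all empty cells of the padded bounding box in two plain box scans; the exterior is the component of the seed corner, and cube faces are counted against that root. Pre_ excludes only the inputs where A raises (empty input or a field int() rejects).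
import Mathlib
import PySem

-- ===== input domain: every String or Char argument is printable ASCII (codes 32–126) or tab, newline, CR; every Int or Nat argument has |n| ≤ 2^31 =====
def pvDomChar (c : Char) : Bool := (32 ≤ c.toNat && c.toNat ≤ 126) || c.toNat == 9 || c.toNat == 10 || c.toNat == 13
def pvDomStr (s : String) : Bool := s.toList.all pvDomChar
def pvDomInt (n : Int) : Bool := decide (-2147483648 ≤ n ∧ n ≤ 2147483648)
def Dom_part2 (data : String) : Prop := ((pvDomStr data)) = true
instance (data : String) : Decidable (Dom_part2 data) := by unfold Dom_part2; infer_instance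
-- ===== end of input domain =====

-- B replaces A's stack-driven flood fill by a disjoint-set (union-find with union by size)
-- over the empty cells of the padded bounding box; exterior = the component of the seed corner.

abbrev Cell := Int × Int × Int

-- ===== shared helpers (identical in both Pythons: parsing, bounds, the 6-neighbour list) =====

-- [int(f) for f in line.split(",")]; the getD defaults are never reached under Pre_
def pvLine (line : String) : List Int :=
  ((PySem.Str.split? line ",").getD []).map (fun t => (PySem.Int.ofStr? t).getD 0)

-- {tuple(map(int, line.split(","))) for line in data.splitlines()} (tuples as List Int)
def pvRows (data : String) : PySem.Set (List Int) :=
  PySem.Set.ofList ((PySem.Str.splitlines data).map pvLine)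

-- lo = min(min(row) for row in rows) - 1 ; hi = max(max(row) for row in rows) + 1
def pvLo (rows : List (List Int)) : Int :=
  ((PySem.List.min? (rows.map (fun r => (PySem.List.min? r (fun x => x)).getD 0))
      (fun x => x)).getD 0) - 1
def pvHi (rows : List (List Int)) : Int :=
  ((PySem.List.max? (rows.map (fun r => (PySem.List.max? r (fun x => x)).getD 0))
      (fun x => x)).getD 0) + 1

-- a 3-cell as the Python 3-tuple it is: membership of a 3-tuple in the cube set
-- (whose rows may have any number of fields) is equality with the 3-field rows
def pvToL (c : Cell) : List Int := [c.1, c.2.1, c.2.2]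

-- a Python tuple is a 3-cell exactly when it has three fields
def pvTriple? (r : List Int) : Option Cell :=
  match r with
  | [x, y, z] => some (x, y, z)
  | _ => none

-- neighbors(pos) on a row of ANY length: zip truncates the 3 offsets to the row
-- (axis 0,1,2; offset -1 then +1), exactly Python's zip(pos, d_pos)
def pvRowNbrs (r : List Int) : List (List Int) :=
  [[-1, 0, 0], [1, 0, 0], [0, -1, 0], [0, 1, 0], [0, 0, -1], [0, 0, 1]].map
    (fun d => List.zipWith (· + ·) r d)

-- neighbors(pos) of a 3-cell, same order
def pvNbrs (c : Cell) : List Cell :=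
  [(c.1 - 1, c.2.1, c.2.2), (c.1 + 1, c.2.1, c.2.2),
   (c.1, c.2.1 - 1, c.2.2), (c.1, c.2.1 + 1, c.2.2),
   (c.1, c.2.1, c.2.2 - 1), (c.1, c.2.1, c.2.2 + 1)]

-- ===== PORT A =====

-- any(i < lo or i > hi for i in item)
def pvOut (lo hi : Int) (c : Cell) : Bool :=
  decide (c.1 < lo) || decide (c.1 > hi) || decide (c.2.1 < lo) || decide (c.2.1 > hi) ||
  decide (c.2.2 < lo) || decide (c.2.2 > hi)

def pvRangeList (lo hi : Int) : List Int := PySem.List.pyRange lo (hi + 1) 1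

def pvBox (lo hi : Int) : List Cell :=
  (pvRangeList lo hi).flatMap (fun x =>
    (pvRangeList lo hi).flatMap (fun y =>
      (pvRangeList lo hi).map (fun z => (x, y, z))))

-- the while-loop of A: todo.pop() pops the LAST element; fuel makes it total
-- (7 * |box| + 2 is provably sufficient, see pvFlood_spec below). Every todo item is a
-- 3-tuple; "item in cubes" is equality with the rows, i.e. contains (pvToL item).
def pvFlood (cubes : PySem.Set (List Int)) (lo hi : Int) :
    Nat → PySem.Set Cell → List Cell → PySem.Set Cell
  | 0, water, _ => water
  | _ + 1, water, [] => water
  | fuel + 1, water, t :: ts =>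
    let item := (t :: ts).getLast (by simp)
    let rest := (t :: ts).dropLast
    if water.contains item || cubes.contains (pvToL item) || pvOut lo hi item then
      pvFlood cubes lo hi fuel water rest
    else
      pvFlood cubes lo hi fuel (water.add item) (rest ++ pvNbrs item)

def part2 (data : String) : Int :=
  let cubes := pvRows data
  let lo := pvLo cubes
  let hi := pvHi cubes
  let water := pvFlood cubes lo hi (7 * (pvBox lo hi).length + 2) PySem.Set.empty [(lo, lo, lo)]
  (cubes.map (fun cube => ((pvRowNbrs cube).countP (fun n =>
    match pvTriple? n with
    | some c => water.contains c
    | none => false) : Int))).sum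

-- ===== PORT B =====

-- while parent[c] != c: c = parent[c]   (fuel-bounded; 3 * |box| + 2 is provably sufficient)
def pvFind (p : PySem.Dict Cell Cell) : Nat → Cell → Cell
  | 0, c => c
  | f + 1, c => if p.getD c c = c then c else pvFind p f (p.getD c c)

abbrev UFSt := PySem.Dict Cell Cell × PySem.Dict Cell Int

-- union by size
def pvUnion (F : Nat) (st : UFSt) (a b : Cell) : UFSt :=
  let ra := pvFind st.1 F a
  let rb := pvFind st.1 F b
  if ra = rb then st
  else if st.2.getD ra 0 < st.2.getD rb 0 then
    (st.1.insert ra rb, st.2.insert rb (st.2.getD rb 0 + st.2.getD ra 0))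
  else
    (st.1.insert rb ra, st.2.insert ra (st.2.getD ra 0 + st.2.getD rb 0))

def pvPosNbrs (c : Cell) : List Cell :=
  [(c.1 + 1, c.2.1, c.2.2), (c.1, c.2.1 + 1, c.2.2), (c.1, c.2.1, c.2.2 + 1)]

-- first x,y,z pass: every empty cell becomes its own singleton
def pvInit (cubes : PySem.Set (List Int)) (box : List Cell) : UFSt :=
  box.foldl
    (fun st c => if cubes.contains (pvToL c) then st else (st.1.insert c c, st.2.insert c 1))
    (PySem.Dict.empty, PySem.Dict.empty)

-- second x,y,z pass: union each empty cell with its +1 empty neighbours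
def pvUnite (F : Nat) (box : List Cell) (st : UFSt) : UFSt :=
  box.foldl
    (fun st c =>
      if st.1.contains c then
        (pvPosNbrs c).foldl (fun st d => if st.1.contains d then pvUnion F st c d else st) st
      else st)
    st

def part2_alt (data : String) : Int :=
  let cubes := pvRows data
  let lo := pvLo cubes
  let hi := pvHi cubes
  let box := pvBox lo hi
  let F := 3 * box.length + 2
  let st := pvUnite F box (pvInit cubes box)
  let root0 := pvFind st.1 F (lo, lo, lo)
  (cubes.map (fun cube =>
    ((pvRowNbrs cube).countP (fun n =>
      match pvTriple? n with
      | some c => st.1.contains c && (pvFind st.1 F c == root0)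
      | none => false) : Int))).sum

-- ===== PRECONDITION & SPEC =====

-- Pre_ excludes exactly the inputs where Python A raises: no input line (min() of an
-- empty sequence raises ValueError) or a field that int() rejects (ValueError).
def Pre_part2 (data : String) : Prop :=
  PySem.Str.splitlines data ≠ [] ∧
  ∀ line ∈ PySem.Str.splitlines data,
    ∀ t ∈ (PySem.Str.split? line ",").getD [], (PySem.Int.ofStr? t).isSome = true

instance (data : String) : Decidable (Pre_part2 data) := by unfold Pre_part2; infer_instance

def pvWitness_part2 : String := "1,1,1\n2,1,1"

def Spec_part2 (data : String) (out : Int) : Prop := out = part2_alt data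
instance (data : String) (out : Int) : Decidable (Spec_part2 data out) := by
  unfold Spec_part2; infer_instance

-- ===== CLAIM (what is proved, stated in full; the proofs are below) =====
def Claim_equal_part2 : Prop :=
  ∀ (data : String), Dom_part2 data → Pre_part2 data → Spec_part2 data (part2 data)

inductive PvPath (okf : Cell → Bool) : Cell → Cell → Prop
  | refl (a : Cell) (h : okf a = true) : PvPath okf a a
  | tail {a b c : Cell} : PvPath okf a b → c ∈ pvNbrs b → okf c = true → PvPath okf a c

def pvOk (cubes : PySem.Set (List Int)) (lo hi : Int) (c : Cell) : Bool :=
  !(cubes.contains (pvToL c)) && !(pvOut lo hi c)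

def pvFreeCnt (okf : Cell → Bool) (lo hi : Int) (water : List Cell) : Nat :=
  (pvBox lo hi).countP (fun c => okf c && !(decide (c ∈ water)))

def pfD (p : PySem.Dict Cell Cell) (c : Cell) : Cell := p.getD c c
def IsRootD (p : PySem.Dict Cell Cell) (c : Cell) : Prop := pfD p c = c
def RootedD (p : PySem.Dict Cell Cell) (n : Nat) (c : Cell) : Prop := IsRootD p ((pfD p)^[n] c)

def EqClE (E : List (Cell × Cell)) : Cell → Cell → Prop :=
  Relation.EqvGen (fun a b => (a, b) ∈ E)

def UFInv (okf : Cell → Bool) (F : Nat) (E : List (Cell × Cell))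
    (p : PySem.Dict Cell Cell) : Prop :=
  (∀ c, p.contains c = okf c) ∧
  (∀ c, okf c = true → okf (pfD p c) = true) ∧
  (∀ c, RootedD p E.length c) ∧
  (∀ a b, okf a = true → okf b = true → (pvFind p F a = pvFind p F b ↔ EqClE E a b))

def pvEdges (okf : Cell → Bool) (bs : List Cell) : List (Cell × Cell) :=
  bs.flatMap (fun c =>
    if okf c = true then (pvPosNbrs c).filterMap (fun d => if okf d = true then some (c, d) else none)
    else [])

-- ===== LEMMAS AND PROOFS (continued) =====

-- ---- basic facts ----

lemma pvPath_ok_left {okf : Cell → Bool} {a b : Cell} (h : PvPath okf a b) : okf a = true := by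
  induction h with
  | refl h => exact h
  | tail _ _ _ ih => exact ih

lemma pvPath_ok_right {okf : Cell → Bool} {a b : Cell} (h : PvPath okf a b) : okf b = true := by
  cases h with
  | refl h => exact h
  | tail _ _ h => exact h

lemma pvPath_trans {okf : Cell → Bool} {a b c : Cell}
    (h1 : PvPath okf a b) (h2 : PvPath okf b c) : PvPath okf a c := by
  induction h2 with
  | refl _ => exact h1
  | tail _ hm ho ih => exact PvPath.tail ih hm ho

lemma pvNbrs_symm {b c : Cell} (h : c ∈ pvNbrs b) : b ∈ pvNbrs c := by
  obtain ⟨x, y, z⟩ := b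
  simp only [pvNbrs, List.mem_cons, List.not_mem_nil, or_false] at h
  rcases h with h | h | h | h | h | h <;> subst h <;> simp [pvNbrs, Prod.ext_iff]

lemma mem_pvBox {lo hi : Int} {c : Cell} : c ∈ pvBox lo hi ↔ pvOut lo hi c = false := by
  obtain ⟨x, y, z⟩ := c
  simp only [pvBox, pvRangeList, List.mem_flatMap, List.mem_map, PySem.List.mem_pyRange_one,
    pvOut, Prod.mk.injEq]
  constructor
  · rintro ⟨a, ha, b, hb, d, hd, rfl, rfl, rfl⟩
    simp only [Bool.or_eq_false_iff, decide_eq_false_iff_not]; omega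
  · intro h
    simp only [Bool.or_eq_false_iff, decide_eq_false_iff_not] at h
    exact ⟨x, by omega, y, by omega, z, by omega, rfl, rfl, rfl⟩

lemma pvOk_iff {cubes : PySem.Set (List Int)} {lo hi : Int} {c : Cell} :
    pvOk cubes lo hi c = true ↔ (¬ pvToL c ∈ cubes ∧ pvOut lo hi c = false) := by
  simp [pvOk]

lemma countP_lt_of {α : Type} (l : List α) (p q : α → Bool) (a : α)
    (ha : a ∈ l) (hpa : p a = true) (hqa : q a = false)
    (himp : ∀ x, q x = true → p x = true) : l.countP q < l.countP p := by
  induction l with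
  | nil => simp at ha
  | cons x xs ih =>
    rw [List.countP_cons, List.countP_cons]
    rcases List.mem_cons.mp ha with rfl | hmem
    · rw [hpa, hqa]
      have : xs.countP q ≤ xs.countP p := by
        apply List.countP_mono_left
        intro x hx hq
        exact himp x hq
      simp only [if_true, Bool.false_eq_true, if_false]
      omega
    · have h := ih hmem
      by_cases hq : q x = true
      · rw [hq, himp x hq]; simp only [if_true]; omega
      · rw [Bool.not_eq_true] at hq
        rw [hq]
        by_cases hp : p x = true <;> simp [hp] <;> omega

-- ===== A side: the stack flood fill computes PvPath-reachability =====

lemma pvPath_absorb {okf : Cell → Bool} {water todoX : List Cell}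
    (hinv : ∀ w ∈ water, ∀ n ∈ pvNbrs w, okf n = true → (n ∈ water ∨ n ∈ todoX))
    {s c : Cell} (hs : s ∈ water) (hp : PvPath okf s c) :
    c ∈ water ∨ ∃ t ∈ todoX, PvPath okf t c := by
  induction hp with
  | refl _ => exact Or.inl hs
  | tail hp hm ho ih =>
    rcases ih with hw | ⟨t, ht, hpt⟩
    · rcases hinv _ hw _ hm ho with h | h
      · exact Or.inl h
      · exact Or.inr ⟨_, h, PvPath.refl _ ho⟩
    · exact Or.inr ⟨t, ht, PvPath.tail hpt hm ho⟩

lemma pvFlood_spec (cubes : PySem.Set (List Int)) (lo hi : Int) :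
    ∀ (fuel : Nat) (water : PySem.Set Cell) (todo : List Cell),
    (∀ w ∈ water, pvOk cubes lo hi w = true) →
    (∀ w ∈ water, ∀ n ∈ pvNbrs w, pvOk cubes lo hi n = true → (n ∈ water ∨ n ∈ todo)) →
    7 * pvFreeCnt (pvOk cubes lo hi) lo hi water + todo.length < fuel →
    ∀ c, (c ∈ pvFlood cubes lo hi fuel water todo ↔
          (c ∈ water ∨ ∃ t ∈ todo, PvPath (pvOk cubes lo hi) t c)) := by
  intro fuel
  induction fuel with
  | zero => intro water todo hw hinv hfuel; omega
  | succ fuel ih =>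
    intro water todo hw hinv hfuel c
    cases todo with
    | nil => simp [pvFlood]
    | cons t ts =>
      have hne : (t :: ts) ≠ [] := by simp
      have hsplit : (t :: ts).dropLast ++ [(t :: ts).getLast hne] = t :: ts :=
        List.dropLast_append_getLast hne
      set item := (t :: ts).getLast hne with hitem
      set rest := (t :: ts).dropLast with hrest
      have hmem_todo : ∀ x, x ∈ t :: ts ↔ (x ∈ rest ∨ x = item) := by
        intro x; rw [← hsplit]; simp
      have hlenrest : rest.length + 1 = ts.length + 1 := by
        rw [hrest, List.length_dropLast]; simp
      simp only [pvFlood]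
      by_cases hskip : (water.contains item || cubes.contains (pvToL item) || pvOut lo hi item) = true
      · rw [if_pos hskip]
        have hcase : item ∈ water ∨ pvOk cubes lo hi item = false := by
          rcases (by simpa using hskip :
              (item ∈ water ∨ pvToL item ∈ cubes) ∨ pvOut lo hi item = true) with (h | h) | h
          · exact Or.inl h
          · refine Or.inr ?_
            simp [pvOk, h]
          · refine Or.inr ?_
            simp [pvOk, h]
        rcases hcase with hitemw | hitembad
        · have hinv' : ∀ w ∈ water, ∀ n ∈ pvNbrs w, pvOk cubes lo hi n = true →
              (n ∈ water ∨ n ∈ rest) := by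
            intro w hw' n hn hon
            rcases hinv w hw' n hn hon with h | h
            · exact Or.inl h
            · rcases (hmem_todo n).mp h with h' | rfl
              · exact Or.inr h'
              · exact Or.inl hitemw
          rw [ih water rest hw hinv' (by simp at hfuel ⊢; omega)]
          constructor
          · rintro (h | ⟨u, hu, hp⟩)
            · exact Or.inl h
            · exact Or.inr ⟨u, (hmem_todo u).mpr (Or.inl hu), hp⟩
          · rintro (h | ⟨u, hu, hp⟩)
            · exact Or.inl h
            · rcases (hmem_todo u).mp hu with h' | rfl
              · exact Or.inr ⟨u, h', hp⟩
              · exact pvPath_absorb hinv' hitemw hp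
        · have hinv' : ∀ w ∈ water, ∀ n ∈ pvNbrs w, pvOk cubes lo hi n = true →
              (n ∈ water ∨ n ∈ rest) := by
            intro w hw' n hn hon
            rcases hinv w hw' n hn hon with h | h
            · exact Or.inl h
            · rcases (hmem_todo n).mp h with h' | rfl
              · exact Or.inr h'
              · simp [hon] at hitembad
          rw [ih water rest hw hinv' (by simp at hfuel ⊢; omega)]
          constructor
          · rintro (h | ⟨u, hu, hp⟩)
            · exact Or.inl h
            · exact Or.inr ⟨u, (hmem_todo u).mpr (Or.inl hu), hp⟩
          · rintro (h | ⟨u, hu, hp⟩)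
            · exact Or.inl h
            · rcases (hmem_todo u).mp hu with h' | rfl
              · exact Or.inr ⟨u, h', hp⟩
              · simp [pvPath_ok_left hp] at hitembad
      · rw [if_neg hskip]
        have hnot : (¬item ∈ water ∧ ¬pvToL item ∈ cubes) ∧ pvOut lo hi item = false := by
          simpa [not_or] using hskip
        obtain ⟨⟨hnotw, hnotc⟩, hout⟩ := hnot
        have hokitem : pvOk cubes lo hi item = true := by
          simp [pvOk, hout]
          exact hnotc
        have hw' : ∀ w ∈ water.add item, pvOk cubes lo hi w = true := by
          intro w hmem
          rcases (PySem.Set.mem_add water item w).mp hmem with h | rfl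
          · exact hw w h
          · exact hokitem
        have hinv' : ∀ w ∈ water.add item, ∀ n ∈ pvNbrs w, pvOk cubes lo hi n = true →
            (n ∈ water.add item ∨ n ∈ rest ++ pvNbrs item) := by
          intro w hmem n hn hon
          rcases (PySem.Set.mem_add water item w).mp hmem with h | rfl
          · rcases hinv w h n hn hon with h' | h'
            · exact Or.inl ((PySem.Set.mem_add water item n).mpr (Or.inl h'))
            · rcases (hmem_todo n).mp h' with h'' | rfl
              · exact Or.inr (List.mem_append_left _ h'')
              · exact Or.inl ((PySem.Set.mem_add water item item).mpr (Or.inr rfl))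
          · exact Or.inr (List.mem_append_right _ hn)
        have hfree : pvFreeCnt (pvOk cubes lo hi) lo hi (water.add item) <
            pvFreeCnt (pvOk cubes lo hi) lo hi water := by
          unfold pvFreeCnt
          apply countP_lt_of _ _ _ item
          · exact mem_pvBox.mpr hout
          · simp [hokitem, hnotw]
          · simp [PySem.Set.mem_add]
          · intro x hx
            simp only [Bool.and_eq_true, Bool.not_eq_eq_eq_not, Bool.not_true,
              decide_eq_false_iff_not] at hx ⊢
            exact ⟨hx.1, fun hmem => hx.2 ((PySem.Set.mem_add water item x).mpr (Or.inl hmem))⟩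
        have hfuel' : 7 * pvFreeCnt (pvOk cubes lo hi) lo hi (water.add item) +
            (rest ++ pvNbrs item).length < fuel := by
          have h6 : (pvNbrs item).length = 6 := rfl
          simp only [List.length_append, h6] at *
          simp at hfuel
          omega
        rw [ih (water.add item) (rest ++ pvNbrs item) hw' hinv' hfuel']
        constructor
        · rintro (h | ⟨u, hu, hp⟩)
          · rcases (PySem.Set.mem_add water item c).mp h with h' | rfl
            · exact Or.inl h'
            · exact Or.inr ⟨item, (hmem_todo item).mpr (Or.inr rfl), PvPath.refl _ hokitem⟩
          · rcases List.mem_append.mp hu with h' | h'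
            · exact Or.inr ⟨u, (hmem_todo u).mpr (Or.inl h'), hp⟩
            · refine Or.inr ⟨item, (hmem_todo item).mpr (Or.inr rfl), ?_⟩
              exact pvPath_trans (PvPath.tail (PvPath.refl _ hokitem) h' (pvPath_ok_left hp)) hp
        · rintro (h | ⟨u, hu, hp⟩)
          · exact Or.inl ((PySem.Set.mem_add water item c).mpr (Or.inl h))
          · rcases (hmem_todo u).mp hu with h' | rfl
            · exact Or.inr ⟨u, List.mem_append_left _ h', hp⟩
            · exact pvPath_absorb hinv'
                ((PySem.Set.mem_add water item item).mpr (Or.inr rfl)) hp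

lemma pvWater_iff (cubes : PySem.Set (List Int)) (lo hi : Int) (c : Cell) :
    c ∈ pvFlood cubes lo hi (7 * (pvBox lo hi).length + 2) PySem.Set.empty [(lo, lo, lo)] ↔
    PvPath (pvOk cubes lo hi) (lo, lo, lo) c := by
  rw [pvFlood_spec cubes lo hi _ PySem.Set.empty [(lo, lo, lo)]
    (by intro w hw; simp [PySem.Set.empty] at hw)
    (by intro w hw; simp [PySem.Set.empty] at hw)
    (by
      have h := List.countP_le_length
        (p := fun c => pvOk cubes lo hi c && !(decide (c ∈ (PySem.Set.empty : PySem.Set Cell))))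
        (l := pvBox lo hi)
      unfold pvFreeCnt
      simp only [List.length_cons, List.length_nil]
      omega)]
  simp [PySem.Set.empty]

-- ===== B side: union-find computes the same reachability =====

lemma pvFind_of_isRoot {p : PySem.Dict Cell Cell} {c : Cell} (h : IsRootD p c) :
    ∀ f, pvFind p f c = c := by
  intro f; cases f with
  | zero => rfl
  | succ f =>
    unfold IsRootD pfD at h
    simp [pvFind, h]

lemma rootedD_succ {p : PySem.Dict Cell Cell} {n : Nat} {c : Cell}
    (h : RootedD p n c) : RootedD p (n + 1) c := by
  unfold RootedD IsRootD at *
  rw [Function.iterate_succ_apply', h]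
  exact h

lemma rootedD_mono {p : PySem.Dict Cell Cell} {n m : Nat} {c : Cell}
    (h : RootedD p n c) (hm : n ≤ m) : RootedD p m c := by
  induction m with
  | zero => simpa [Nat.le_zero.mp hm] using h
  | succ m ih =>
    rcases Nat.lt_or_ge n (m + 1) with h' | h'
    · exact rootedD_succ (ih (by omega))
    · simpa [Nat.le_antisymm hm h'] using h

lemma pvFind_eq_iter {p : PySem.Dict Cell Cell} :
    ∀ {n : Nat} {c : Cell} {f : Nat}, RootedD p n c → n < f →
      pvFind p f c = (pfD p)^[n] c := by
  intro n
  induction n with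
  | zero =>
    intro c f h hf
    cases f with
    | zero => omega
    | succ f => simpa using pvFind_of_isRoot h (f + 1)
  | succ n ih =>
    intro c f h hf
    cases f with
    | zero => omega
    | succ f =>
      by_cases hr : IsRootD p c
      · rw [pvFind_of_isRoot hr, Function.iterate_fixed hr]
      · have hd : RootedD p n (pfD p c) := by
          unfold RootedD at h ⊢
          rwa [Function.iterate_succ_apply] at h
        have : pvFind p (f + 1) c = pvFind p f (pfD p c) := by
          unfold IsRootD pfD at hr
          simp only [pvFind]
          rw [if_neg hr]
          rfl
        rw [this, ih hd (by omega), Function.iterate_succ_apply]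

lemma pvFind_isRoot {p : PySem.Dict Cell Cell} {n : Nat} {c : Cell} {f : Nat}
    (h : RootedD p n c) (hf : n < f) : IsRootD p (pvFind p f c) := by
  rw [pvFind_eq_iter h hf]; exact h

lemma pvFind_ok {okf : Cell → Bool} {p : PySem.Dict Cell Cell}
    (hok : ∀ c, okf c = true → okf (pfD p c) = true) :
    ∀ (f : Nat) (c : Cell), okf c = true → okf (pvFind p f c) = true := by
  intro f
  induction f with
  | zero => intro c h; exact h
  | succ f ih =>
    intro c h
    simp only [pvFind]
    split
    · exact h
    · exact ih _ (hok _ h)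

lemma pfD_insert (p : PySem.Dict Cell Cell) (r1 r2 x : Cell) :
    pfD (p.insert r1 r2) x = if x = r1 then r2 else pfD p x := by
  unfold pfD
  rw [PySem.Dict.getD_insert]

lemma iter_insert {p : PySem.Dict Cell Cell} {r1 r2 : Cell}
    (hr1 : IsRootD p r1) (hr2 : IsRootD p r2) (hne : r1 ≠ r2) :
    ∀ (n : Nat) (c : Cell), RootedD p n c →
      ((pfD (p.insert r1 r2))^[n + 1] c
          = (if (pfD p)^[n] c = r1 then r2 else (pfD p)^[n] c)) ∧
      RootedD (p.insert r1 r2) (n + 1) c := by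
  have hpf2 : pfD (p.insert r1 r2) r2 = r2 := by
    rw [pfD_insert, if_neg (Ne.symm hne)]; exact hr2
  intro n
  induction n with
  | zero =>
    intro c h
    by_cases hc : c = r1
    · have h1 : pfD (p.insert r1 r2) c = r2 := by rw [pfD_insert, if_pos hc]
      refine ⟨?_, ?_⟩
      · rw [Function.iterate_succ_apply, Function.iterate_zero_apply,
          Function.iterate_zero_apply, h1, if_pos hc]
      · unfold RootedD IsRootD
        rw [Function.iterate_succ_apply, Function.iterate_zero_apply, h1]
        exact hpf2
    · have hfix : pfD (p.insert r1 r2) c = c := by rw [pfD_insert, if_neg hc]; exact h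
      refine ⟨?_, ?_⟩
      · rw [Function.iterate_succ_apply, Function.iterate_zero_apply,
          Function.iterate_zero_apply, hfix, if_neg hc]
      · unfold RootedD IsRootD
        rw [Function.iterate_succ_apply, Function.iterate_zero_apply, hfix]
        exact hfix
  | succ n ih =>
    intro c h
    by_cases hr : IsRootD p c
    · have hfix : (pfD p)^[n + 1] c = c := Function.iterate_fixed hr (n + 1)
      by_cases hc : c = r1
      · have h1 : pfD (p.insert r1 r2) c = r2 := by rw [pfD_insert, if_pos hc]
        have hit : (pfD (p.insert r1 r2))^[n + 1 + 1] c = r2 := by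
          rw [Function.iterate_succ_apply, h1, Function.iterate_fixed hpf2]
        refine ⟨?_, ?_⟩
        · rw [hit, hfix, if_pos hc]
        · unfold RootedD IsRootD
          rw [hit]; exact hpf2
      · have hfix' : pfD (p.insert r1 r2) c = c := by rw [pfD_insert, if_neg hc]; exact hr
        refine ⟨?_, ?_⟩
        · rw [Function.iterate_fixed hfix', hfix, if_neg hc]
        · unfold RootedD IsRootD
          rw [Function.iterate_fixed hfix']; exact hfix'
    · have hcr1 : c ≠ r1 := fun hh => hr (hh ▸ hr1)
      have hd : RootedD p n (pfD p c) := by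
        unfold RootedD at h ⊢
        rwa [Function.iterate_succ_apply] at h
      obtain ⟨ih1, ih2⟩ := ih (pfD p c) hd
      have hstep : pfD (p.insert r1 r2) c = pfD p c := by rw [pfD_insert, if_neg hcr1]
      refine ⟨?_, ?_⟩
      · rw [Function.iterate_succ_apply, hstep, ih1, Function.iterate_succ_apply]
      · unfold RootedD at ih2 ⊢
        rwa [Function.iterate_succ_apply, hstep]

lemma root_insert {p : PySem.Dict Cell Cell} {r1 r2 : Cell} {k F : Nat}
    (hr1 : IsRootD p r1) (hr2 : IsRootD p r2) (hne : r1 ≠ r2)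
    (hro : ∀ c, RootedD p k c) (hkF : k + 1 < F) :
    (∀ c, pvFind (p.insert r1 r2) F c
        = (if pvFind p F c = r1 then r2 else pvFind p F c)) ∧
    (∀ c, RootedD (p.insert r1 r2) (k + 1) c) := by
  constructor
  · intro c
    have h := iter_insert hr1 hr2 hne k c (hro c)
    rw [pvFind_eq_iter h.2 hkF, pvFind_eq_iter (hro c) (by omega), h.1]
  · intro c
    exact (iter_insert hr1 hr2 hne k c (hro c)).2

-- ---- EqvGen bookkeeping ----

lemma eqcl_nil {a b : Cell} : EqClE [] a b ↔ a = b := by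
  constructor
  · intro h
    induction h with
    | rel _ _ h => simp at h
    | refl _ => rfl
    | symm _ _ _ ih => exact ih.symm
    | trans _ _ _ _ _ ih1 ih2 => exact ih1.trans ih2
  · rintro rfl; exact Relation.EqvGen.refl _

lemma eqcl_mono {E E' : List (Cell × Cell)} (h : ∀ e ∈ E, e ∈ E') {a b : Cell}
    (he : EqClE E a b) : EqClE E' a b := by
  refine Relation.EqvGen.mono ?_ he
  intro x y hxy
  exact h _ hxy

lemma eqcl_symm {E : List (Cell × Cell)} {a b : Cell} (h : EqClE E a b) : EqClE E b a :=
  Relation.EqvGen.symm _ _ h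

lemma eqcl_trans {E : List (Cell × Cell)} {a b c : Cell}
    (h1 : EqClE E a b) (h2 : EqClE E b c) : EqClE E a c :=
  Relation.EqvGen.trans _ _ _ h1 h2

lemma eqcl_append_iff (E : List (Cell × Cell)) (a b x y : Cell) :
    EqClE (E ++ [(a, b)]) x y ↔
    EqClE E x y ∨ ((EqClE E x a ∨ EqClE E x b) ∧ (EqClE E y a ∨ EqClE E y b)) := by
  constructor
  · intro h
    induction h with
    | rel u v huv =>
      rcases List.mem_append.mp huv with h | h
      · exact Or.inl (Relation.EqvGen.rel _ _ h)
      · simp only [List.mem_singleton, Prod.mk.injEq] at h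
        obtain ⟨rfl, rfl⟩ := h
        exact Or.inr ⟨Or.inl (Relation.EqvGen.refl _), Or.inr (Relation.EqvGen.refl _)⟩
    | refl u => exact Or.inl (Relation.EqvGen.refl _)
    | symm u v _ ih =>
      rcases ih with h | ⟨h1, h2⟩
      · exact Or.inl (eqcl_symm h)
      · exact Or.inr ⟨h2, h1⟩
    | trans u v w _ _ ih1 ih2 =>
      rcases ih1 with h1 | ⟨h1a, h1b⟩
      · rcases ih2 with h2 | ⟨h2a, h2b⟩
        · exact Or.inl (eqcl_trans h1 h2)
        · refine Or.inr ⟨?_, h2b⟩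
          rcases h2a with h | h
          · exact Or.inl (eqcl_trans h1 h)
          · exact Or.inr (eqcl_trans h1 h)
      · rcases ih2 with h2 | ⟨h2a, h2b⟩
        · refine Or.inr ⟨h1a, ?_⟩
          rcases h1b with h | h
          · exact Or.inl (eqcl_trans (eqcl_symm h2) h)
          · exact Or.inr (eqcl_trans (eqcl_symm h2) h)
        · exact Or.inr ⟨h1a, h2b⟩
  · have hsub : ∀ u v, EqClE E u v → EqClE (E ++ [(a, b)]) u v := by
      intro u v h
      exact eqcl_mono (fun e he => List.mem_append_left _ he) h
    have hab : EqClE (E ++ [(a, b)]) a b :=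
      Relation.EqvGen.rel _ _ (List.mem_append_right _ (by simp))
    rintro (h | ⟨hx, hy⟩)
    · exact hsub _ _ h
    · have hxb : EqClE (E ++ [(a, b)]) x b := by
        rcases hx with h | h
        · exact eqcl_trans (hsub _ _ h) hab
        · exact hsub _ _ h
      have hyb : EqClE (E ++ [(a, b)]) y b := by
        rcases hy with h | h
        · exact eqcl_trans (hsub _ _ h) hab
        · exact hsub _ _ h
      exact eqcl_trans hxb (eqcl_symm hyb)

-- ---- union-find invariant preservation ----

-- merging the class of a into the class of b by re-pointing a's root
lemma pvInsertFind_inv {okf : Cell → Bool} {F : Nat} {E : List (Cell × Cell)}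
    {p : PySem.Dict Cell Cell} (hinv : UFInv okf F E p) (hE : E.length + 1 < F)
    {a b : Cell} (ha : okf a = true) (hb : okf b = true)
    (hne : pvFind p F a ≠ pvFind p F b) :
    UFInv okf F (E ++ [(a, b)]) (p.insert (pvFind p F a) (pvFind p F b)) := by
  obtain ⟨hdom, hok, hro, hrel⟩ := hinv
  have hlt : E.length < F := by omega
  have hraRoot : IsRootD p (pvFind p F a) := pvFind_isRoot (hro a) hlt
  have hrbRoot : IsRootD p (pvFind p F b) := pvFind_isRoot (hro b) hlt
  have hraOk : okf (pvFind p F a) = true := pvFind_ok hok F a ha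
  have hrbOk : okf (pvFind p F b) = true := pvFind_ok hok F b hb
  obtain ⟨hfind', hroot'⟩ := root_insert hraRoot hrbRoot hne hro hE
  have hfa : pvFind p F a = pvFind p F a := rfl
  refine ⟨?_, ?_, ?_, ?_⟩
  · intro c
    rw [PySem.Dict.contains_insert]
    by_cases hc : c = pvFind p F a
    · subst hc; simp [hraOk]
    · have hbeq : (c == pvFind p F a) = false := by simpa using hc
      rw [hbeq, Bool.false_or]
      exact hdom c
  · intro c hc
    rw [pfD_insert]
    split
    · exact hrbOk
    · exact hok c hc
  · intro c
    simpa [List.length_append] using hroot' c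
  · intro x y hx hy
    rw [hfind' x, hfind' y, eqcl_append_iff]
    rw [← hrel x y hx hy, ← hrel x a hx ha, ← hrel x b hx hb,
        ← hrel y a hy ha, ← hrel y b hy hb]
    by_cases hxa : pvFind p F x = pvFind p F a <;>
      by_cases hya : pvFind p F y = pvFind p F a
    · rw [if_pos hxa, if_pos hya]
      exact iff_of_true rfl (Or.inr ⟨Or.inl hxa, Or.inl hya⟩)
    · rw [if_pos hxa, if_neg hya]
      constructor
      · intro h; exact Or.inr ⟨Or.inl hxa, Or.inr h.symm⟩
      · rintro (h | ⟨_, h | h⟩)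
        · exact absurd (h.symm.trans hxa) hya
        · exact absurd h hya
        · exact h.symm
    · rw [if_neg hxa, if_pos hya]
      constructor
      · intro h; exact Or.inr ⟨Or.inr h, Or.inl hya⟩
      · rintro (h | ⟨h | h, _⟩)
        · exact absurd (h.trans hya) hxa
        · exact absurd h hxa
        · exact h
    · rw [if_neg hxa, if_neg hya]
      constructor
      · exact Or.inl
      · rintro (h | ⟨hx1, hy1⟩)
        · exact h
        · rcases hx1 with h1 | h1
          · exact absurd h1 hxa
          · rcases hy1 with h2 | h2
            · exact absurd h2 hya
            · exact h1.trans h2.symm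

lemma ufinv_swap_edge {okf : Cell → Bool} {F : Nat} {E : List (Cell × Cell)}
    {p : PySem.Dict Cell Cell} {a b : Cell}
    (h : UFInv okf F (E ++ [(b, a)]) p) : UFInv okf F (E ++ [(a, b)]) p := by
  obtain ⟨hdom, hok, hro, hrel⟩ := h
  refine ⟨hdom, hok, by simpa [List.length_append] using hro, ?_⟩
  intro x y hx hy
  rw [hrel x y hx hy, eqcl_append_iff E b a, eqcl_append_iff E a b]
  tauto

lemma pvUnion_inv {okf : Cell → Bool} {F : Nat} {E : List (Cell × Cell)} {st : UFSt}
    (hinv : UFInv okf F E st.1) (hE : E.length + 1 < F) {a b : Cell}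
    (ha : okf a = true) (hb : okf b = true) :
    UFInv okf F (E ++ [(a, b)]) (pvUnion F st a b).1 := by
  simp only [pvUnion]
  by_cases hr : pvFind st.1 F a = pvFind st.1 F b
  · rw [if_pos hr]
    obtain ⟨hdom, hok, hro, hrel⟩ := hinv
    have hQab : EqClE E a b := (hrel a b ha hb).mp hr
    refine ⟨hdom, hok, ?_, ?_⟩
    · intro c
      exact rootedD_mono (hro c) (by simp)
    · intro x y hx hy
      rw [hrel x y hx hy, eqcl_append_iff]
      constructor
      · intro h; exact Or.inl h
      · rintro (h | ⟨hx', hy'⟩)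
        · exact h
        · have hxb : EqClE E x b := by
            rcases hx' with h | h
            · exact eqcl_trans h hQab
            · exact h
          have hyb : EqClE E y b := by
            rcases hy' with h | h
            · exact eqcl_trans h hQab
            · exact h
          exact eqcl_trans hxb (eqcl_symm hyb)
  · rw [if_neg hr]
    by_cases hsz : st.2.getD (pvFind st.1 F a) 0 < st.2.getD (pvFind st.1 F b) 0
    · rw [if_pos hsz]
      exact pvInsertFind_inv hinv hE ha hb hr
    · rw [if_neg hsz]
      exact ufinv_swap_edge (pvInsertFind_inv hinv hE hb ha (Ne.symm hr))

lemma pvInit_contains_aux (cubes : PySem.Set (List Int)) :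
    ∀ (box : List Cell) (st : UFSt) (c : Cell),
      ((box.foldl (fun st c =>
          if cubes.contains (pvToL c) then st else (st.1.insert c c, st.2.insert c 1)) st).1.contains c)
        = ((decide (c ∈ box) && !cubes.contains (pvToL c)) || st.1.contains c) := by
  intro box
  induction box with
  | nil => intro st c; simp
  | cons x bs ih =>
    intro st c
    rw [List.foldl_cons]
    by_cases hx : cubes.contains (pvToL x) = true
    · rw [if_pos hx, ih]
      cases hcc : cubes.contains (pvToL c) with
      | true => simp
      | false =>
        have hc : c ≠ x := fun e => by rw [e, hx] at hcc; cases hcc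
        simp [List.mem_cons, hc]
    · rw [if_neg hx, ih]
      show (decide (c ∈ bs) && !cubes.contains (pvToL c) || (st.1.insert x x).contains c) = _
      rw [PySem.Dict.contains_insert]
      by_cases hc : c = x
      · have hxm : pvToL x ∉ cubes := by
          rw [Bool.not_eq_true] at hx
          simpa using hx
        simp [hc, hxm]
      · have hcx : (c == x) = false := by simpa using hc
        simp [List.mem_cons, hc, hcx]

lemma pvInit_pf_aux (cubes : PySem.Set (List Int)) :
    ∀ (box : List Cell) (st : UFSt), (∀ x, pfD st.1 x = x) →
      ∀ x, pfD ((box.foldl (fun st c =>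
        if cubes.contains (pvToL c) then st else (st.1.insert c c, st.2.insert c 1)) st).1) x = x := by
  intro box
  induction box with
  | nil => intro st hst; exact hst
  | cons d bs ih =>
    intro st hst
    rw [List.foldl_cons]
    apply ih
    intro x
    by_cases hd : cubes.contains (pvToL d) = true
    · rw [if_pos hd]; exact hst x
    · rw [if_neg hd]
      show pfD (st.1.insert d d) x = x
      rw [pfD_insert]
      split
      next hxd => exact hxd.symm
      next => exact hst x

lemma pvInit_spec (cubes : PySem.Set (List Int)) (box : List Cell) :
    (∀ c, (pvInit cubes box).1.contains c = (decide (c ∈ box) && !cubes.contains (pvToL c))) ∧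
    (∀ c, pfD (pvInit cubes box).1 c = c) := by
  constructor
  · intro c
    unfold pvInit
    rw [pvInit_contains_aux]
    simp [PySem.Dict.contains_empty]
  · intro c
    unfold pvInit
    apply pvInit_pf_aux
    intro x
    unfold pfD
    simp [PySem.Dict.getD_empty]

lemma pvUniteInner {okf : Cell → Bool} {F : Nat} {c : Cell} (hc : okf c = true) :
    ∀ (ds : List Cell) (st : UFSt) (E : List (Cell × Cell)),
      UFInv okf F E st.1 → E.length + ds.length < F →
      UFInv okf F
        (E ++ ds.filterMap (fun d => if okf d = true then some (c, d) else none))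
        ((ds.foldl (fun st d => if st.1.contains d then pvUnion F st c d else st) st)).1 := by
  intro ds
  induction ds with
  | nil =>
    intro st E hinv _
    rw [List.filterMap_nil, List.append_nil]
    exact hinv
  | cons d ds ih =>
    intro st E hinv hlen
    rw [List.foldl_cons, List.filterMap_cons]
    have hdom := hinv.1
    by_cases hd : okf d = true
    · have hcond : st.1.contains d = true := by rw [hdom]; exact hd
      rw [if_pos hcond, if_pos hd]
      have hinv' := pvUnion_inv hinv (by simp at hlen ⊢; omega) hc hd
      have hres := ih (pvUnion F st c d) (E ++ [(c, d)]) hinv'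
        (by simp at hlen ⊢; omega)
      simpa [List.append_assoc] using hres
    · have hcond : ¬ st.1.contains d = true := by rw [hdom]; simpa using hd
      rw [if_neg hcond, if_neg (by simpa using hd : ¬ okf d = true)]
      exact ih st E hinv (by simp at hlen ⊢; omega)

lemma pvUnite_inv {okf : Cell → Bool} {F : Nat} :
    ∀ (bs : List Cell) (st : UFSt) (E : List (Cell × Cell)),
      UFInv okf F E st.1 → E.length + 3 * bs.length < F →
      UFInv okf F (E ++ pvEdges okf bs) ((pvUnite F bs st)).1 := by
  intro bs
  induction bs with
  | nil =>
    intro st E hinv _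
    show UFInv okf F (E ++ []) ((pvUnite F [] st)).1
    rw [List.append_nil]
    exact hinv
  | cons c bs ih =>
    intro st E hinv hlen
    simp only [pvUnite, List.foldl_cons] at ih ⊢
    simp only [pvEdges, List.flatMap_cons]
    have hdom := hinv.1
    by_cases hc : okf c = true
    · have hcond : st.1.contains c = true := by rw [hdom]; exact hc
      rw [if_pos hcond, if_pos hc]
      have hfm := pvUniteInner (F := F) hc (pvPosNbrs c) st E hinv
        (by simp only [pvPosNbrs, List.length_cons, List.length_nil] at hlen ⊢; omega)
      have hlenfm : ((pvPosNbrs c).filterMap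
          (fun d => if okf d = true then some (c, d) else none)).length ≤ 3 := by
        have h := List.length_filterMap_le
          (fun d => if okf d = true then some (c, d) else none) (pvPosNbrs c)
        simpa [pvPosNbrs] using h
      have hres := ih _ _ hfm (by
        simp only [List.length_append, List.length_cons] at hlen ⊢
        omega)
      simp only [pvEdges] at hres
      rw [← List.append_assoc]
      exact hres
    · have hcond : ¬ st.1.contains c = true := by rw [hdom]; simpa using hc
      rw [if_neg hcond, if_neg (by simpa using hc : ¬ okf c = true)]
      have hres := ih st E hinv (by simp only [List.length_cons] at hlen ⊢; omega)
      simp only [pvEdges] at hres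
      simpa using hres

-- ---- edges ↔ paths ----

lemma pvPosNbrs_sub {c d : Cell} (h : d ∈ pvPosNbrs c) : d ∈ pvNbrs c := by
  simp only [pvPosNbrs, List.mem_cons, List.not_mem_nil, or_false] at h
  rcases h with h | h | h <;> subst h <;> simp [pvNbrs]

lemma mem_pvEdges {cubes : PySem.Set (List Int)} {lo hi : Int} {x y : Cell} :
    (x, y) ∈ pvEdges (pvOk cubes lo hi) (pvBox lo hi) ↔
    (pvOk cubes lo hi x = true ∧ pvOk cubes lo hi y = true ∧ y ∈ pvPosNbrs x) := by
  unfold pvEdges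
  rw [List.mem_flatMap]
  constructor
  · rintro ⟨c, hc, hmem⟩
    by_cases hokc : pvOk cubes lo hi c = true
    · rw [if_pos hokc] at hmem
      rw [List.mem_filterMap] at hmem
      obtain ⟨d, hd, hif⟩ := hmem
      by_cases hokd : pvOk cubes lo hi d = true
      · rw [if_pos hokd] at hif
        obtain ⟨rfl, rfl⟩ := Prod.mk.injEq .. ▸ (Option.some.injEq .. ▸ hif :
          (c, d) = (x, y))
        exact ⟨hokc, hokd, hd⟩
      · rw [if_neg hokd] at hif; exact absurd hif (by simp)
    · rw [if_neg hokc] at hmem; exact absurd hmem (by simp)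
  · rintro ⟨hx, hy, hmem⟩
    refine ⟨x, ?_, ?_⟩
    · rw [mem_pvBox]
      have := pvOk_iff.mp hx
      exact this.2
    · rw [if_pos hx, List.mem_filterMap]
      exact ⟨y, hmem, by rw [if_pos hy]⟩

lemma pvEdge_of_nbr {cubes : PySem.Set (List Int)} {lo hi : Int} {b c : Cell}
    (hb : pvOk cubes lo hi b = true) (hc : pvOk cubes lo hi c = true) (hmem : c ∈ pvNbrs b) :
    (b, c) ∈ pvEdges (pvOk cubes lo hi) (pvBox lo hi) ∨
    (c, b) ∈ pvEdges (pvOk cubes lo hi) (pvBox lo hi) := by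
  obtain ⟨x, y, z⟩ := b
  simp only [pvNbrs, List.mem_cons, List.not_mem_nil, or_false] at hmem
  rcases hmem with h | h | h | h | h | h <;> subst h
  · exact Or.inr (mem_pvEdges.mpr ⟨hc, hb, by simp [pvPosNbrs, Prod.ext_iff]⟩)
  · exact Or.inl (mem_pvEdges.mpr ⟨hb, hc, by simp [pvPosNbrs]⟩)
  · exact Or.inr (mem_pvEdges.mpr ⟨hc, hb, by simp [pvPosNbrs, Prod.ext_iff]⟩)
  · exact Or.inl (mem_pvEdges.mpr ⟨hb, hc, by simp [pvPosNbrs]⟩)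
  · exact Or.inr (mem_pvEdges.mpr ⟨hc, hb, by simp [pvPosNbrs, Prod.ext_iff]⟩)
  · exact Or.inl (mem_pvEdges.mpr ⟨hb, hc, by simp [pvPosNbrs]⟩)

lemma pvPath_to_eqcl {cubes : PySem.Set (List Int)} {lo hi : Int} {s c : Cell}
    (h : PvPath (pvOk cubes lo hi) s c) :
    EqClE (pvEdges (pvOk cubes lo hi) (pvBox lo hi)) s c := by
  induction h with
  | refl _ => exact Relation.EqvGen.refl _
  | tail hp hm ho ih =>
    rcases pvEdge_of_nbr (pvPath_ok_right hp) ho hm with h | h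
    · exact eqcl_trans ih (Relation.EqvGen.rel _ _ h)
    · exact eqcl_trans ih (eqcl_symm (Relation.EqvGen.rel _ _ h))

lemma eqcl_to_pvPath {cubes : PySem.Set (List Int)} {lo hi : Int} {x y : Cell}
    (h : EqClE (pvEdges (pvOk cubes lo hi) (pvBox lo hi)) x y) :
    (pvOk cubes lo hi x = true → PvPath (pvOk cubes lo hi) x y) ∧
    (pvOk cubes lo hi y = true → PvPath (pvOk cubes lo hi) y x) := by
  induction h with
  | rel u v huv =>
    obtain ⟨hu, hv, hmem⟩ := mem_pvEdges.mp huv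
    constructor
    · intro _
      exact PvPath.tail (PvPath.refl u hu) (pvPosNbrs_sub hmem) hv
    · intro _
      exact PvPath.tail (PvPath.refl v hv) (pvNbrs_symm (pvPosNbrs_sub hmem)) hu
  | refl u => exact ⟨fun h => PvPath.refl u h, fun h => PvPath.refl u h⟩
  | symm u v _ ih => exact ⟨ih.2, ih.1⟩
  | trans u v w _ _ ih1 ih2 =>
    constructor
    · intro hu
      have p1 := ih1.1 hu
      exact pvPath_trans p1 (ih2.1 (pvPath_ok_right p1))
    · intro hw
      have p2 := ih2.2 hw
      exact pvPath_trans p2 (ih1.2 (pvPath_ok_right p2))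

-- ---- the central agreement: water membership = exterior-root test ----

lemma pvMain (cubes : PySem.Set (List Int)) (lo hi : Int) (n : Cell) :
    (pvFlood cubes lo hi (7 * (pvBox lo hi).length + 2) PySem.Set.empty [(lo, lo, lo)]).contains n
    = ((pvUnite (3 * (pvBox lo hi).length + 2) (pvBox lo hi) (pvInit cubes (pvBox lo hi))).1.contains n
       && (pvFind (pvUnite (3 * (pvBox lo hi).length + 2) (pvBox lo hi) (pvInit cubes (pvBox lo hi))).1 (3 * (pvBox lo hi).length + 2) n
           == pvFind (pvUnite (3 * (pvBox lo hi).length + 2) (pvBox lo hi) (pvInit cubes (pvBox lo hi))).1 (3 * (pvBox lo hi).length + 2) (lo, lo, lo))) := by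
  obtain ⟨hcont, hpf⟩ := pvInit_spec cubes (pvBox lo hi)
  have hdom0 : ∀ c, (pvInit cubes (pvBox lo hi)).1.contains c = pvOk cubes lo hi c := by
    intro c
    rw [hcont]
    have hbx : decide (c ∈ pvBox lo hi) = !(pvOut lo hi c) := by
      by_cases h : pvOut lo hi c = true
      · simp [mem_pvBox, h]
      · simp only [Bool.not_eq_true] at h
        simp [mem_pvBox, h]
    rw [hbx, pvOk, Bool.and_comm]
  have hroot0 : ∀ c, RootedD (pvInit cubes (pvBox lo hi)).1 0 c := by
    intro c
    unfold RootedD IsRootD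
    simpa using hpf c
  have inv0 : UFInv (pvOk cubes lo hi) (3 * (pvBox lo hi).length + 2) []
      (pvInit cubes (pvBox lo hi)).1 := by
    refine ⟨hdom0, ?_, ?_, ?_⟩
    · intro c hc; rw [hpf c]; exact hc
    · intro c; simpa using hroot0 c
    · intro a b _ _
      rw [pvFind_of_isRoot (hpf a) _, pvFind_of_isRoot (hpf b) _, eqcl_nil]
  have invF := pvUnite_inv (okf := pvOk cubes lo hi) (F := 3 * (pvBox lo hi).length + 2)
    (pvBox lo hi) (pvInit cubes (pvBox lo hi)) [] inv0 (by simp)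
  rw [List.nil_append] at invF
  obtain ⟨hdom, hok, hro, hrel⟩ := invF
  set F := 3 * (pvBox lo hi).length + 2 with hF
  set p := (pvUnite F (pvBox lo hi) (pvInit cubes (pvBox lo hi))).1 with hp
  have hmemiff : ((pvFlood cubes lo hi (7 * (pvBox lo hi).length + 2)
      PySem.Set.empty [(lo, lo, lo)]).contains n = true) ↔
      n ∈ pvFlood cubes lo hi (7 * (pvBox lo hi).length + 2) PySem.Set.empty [(lo, lo, lo)] := by
    simp
  rw [Bool.eq_iff_iff, hmemiff, pvWater_iff]
  simp only [Bool.and_eq_true, beq_iff_eq, hdom n]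
  by_cases hseed : pvOk cubes lo hi (lo, lo, lo) = true
  · constructor
    · intro hpth
      refine ⟨pvPath_ok_right hpth, ?_⟩
      exact (hrel n (lo, lo, lo) (pvPath_ok_right hpth) hseed).mpr
        (eqcl_symm (pvPath_to_eqcl hpth))
    · rintro ⟨hn, hf⟩
      exact (eqcl_to_pvPath ((hrel n (lo, lo, lo) hn hseed).mp hf)).2 hseed
  · constructor
    · intro hpth
      exact absurd (pvPath_ok_left hpth) hseed
    · rintro ⟨hn, hf⟩
      exfalso
      have hnk : p.contains (lo, lo, lo) = false := by
        rw [hdom]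
        simpa using hseed
      have hroot : IsRootD p (lo, lo, lo) := by
        unfold IsRootD pfD
        rw [PySem.Dict.getD_of_not_contains p _ hnk]
      have hokroot : pvOk cubes lo hi (pvFind p F n) = true := pvFind_ok hok F n hn
      rw [hf, pvFind_of_isRoot hroot] at hokroot
      exact hseed hokroot

-- ===== VERDICT (by name: the statement is the Claim_ definition above) =====
theorem part2_spec : Claim_equal_part2 := by
  intro data _ _
  unfold Spec_part2
  simp only [part2, part2_alt]
  have h := pvMain (pvRows data) (pvLo (pvRows data)) (pvHi (pvRows data))
  refine congrArg List.sum (List.map_congr_left ?_)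
  intro cube _
  refine congrArg (fun z : Nat => (z : Int)) (List.countP_congr ?_)
  intro n _
  cases hn : pvTriple? n with
  | none => rfl
  | some c => simp only [h c]
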